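-- pv_equiv track=rewrite | github.com/NssGourav/CodeStreak | fibonacciness.py | max_fibonacciness
-- ===== SOURCE A (Python) =====
-- def max_fibonacciness(test_cases):
--     results = []
--     for case in test_cases:
--         a1, a2, a4, a5 = case
--         a3_candidates = set([a1 + a2, a4 - a2, a5 - a4])
--         max_fib = 0
--         for a3 in a3_candidates:
--             fib = 0
--             if a3 == a1 + a2:
--                 fib += 1
--             if a4 == a2 + a3:
--                 fib += 1
--             if a5 == a3 + a4:
--                 fib += 1
--             if fib > max_fib:
--                 max_fib = fib
--         a3_pair1 = a1 + a2
--         if a4 == a2 + a3_pair1: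
--             fib_pair1 = 2
--             if a5 == a3_pair1 + a4:
--                 fib_pair1 += 1
--             if fib_pair1 > max_fib:
--                 max_fib = fib_pair1
--         a3_pair2 = a4 - a2
--         if a5 == a3_pair2 + a4:
--             fib_pair2 = 2
--             if a3_pair2 == a1 + a2:
--                 fib_pair2 += 1
--             if fib_pair2 > max_fib:
--                 max_fib = fib_pair2
--         a3_pair3 = a5 - a4
--         if a3_pair3 == a1 + a2:
--             fib_pair3 = 2
--             if a4 == a2 + a3_pair3:
--                 fib_pair3 += 1
--             if fib_pair3 > max_fib:
--                 max_fib = fib_pair3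
--         results.append(max_fib)
--     return results
-- ===== SOURCE B (Python) =====
-- def max_fibonacciness(test_cases):
--     # The three Fibonacci relations pin a3 to a1+a2, a4-a2 and a5-a4 respectively,
--     # so the best achievable count is 4 minus the number of distinct pinned values.
--     return [4 - len({a1 + a2, a4 - a2, a5 - a4}) for a1, a2, a4, a5 in test_cases]
-- ===== Notes on version B (the rewrite author's own statement) =====
-- stated objective: simpler
-- what changed: Replaced A's enumerate-candidates-and-check-relations control flow (nine relation branches plus three pair-case blocks) by the closed form 4 - |{a1+a2, a4-a2, a5-a4}|: each relation pins a3 to one target, so the answer is 4 minus the number of distinct pinned values.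
import Mathlib
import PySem

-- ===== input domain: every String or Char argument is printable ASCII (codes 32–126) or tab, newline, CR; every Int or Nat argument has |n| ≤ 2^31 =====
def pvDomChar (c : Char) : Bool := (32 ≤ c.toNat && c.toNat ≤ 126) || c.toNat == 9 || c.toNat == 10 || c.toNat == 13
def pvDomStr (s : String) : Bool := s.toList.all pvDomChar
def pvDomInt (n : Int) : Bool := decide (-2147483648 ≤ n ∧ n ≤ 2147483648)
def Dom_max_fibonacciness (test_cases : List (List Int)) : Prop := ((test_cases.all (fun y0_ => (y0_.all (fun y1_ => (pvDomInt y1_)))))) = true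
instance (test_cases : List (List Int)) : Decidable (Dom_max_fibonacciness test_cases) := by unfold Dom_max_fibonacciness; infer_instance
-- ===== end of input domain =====

-- B replaces A's candidate enumeration and relation-check branches by the closed form
-- 4 - |{a1+a2, a4-a2, a5-a4}| per case (simpler, same cost).


-- ===== PORT A =====
-- one iteration of A's 'for case in test_cases' body (case already unpacked; Pre_ guarantees length 4)
def pvFibCaseA (a1 a2 a4 a5 : Int) : Int :=
  let a3_candidates : PySem.Set Int := PySem.Set.ofList [a1 + a2, a4 - a2, a5 - a4]
  -- the candidate loop; max is independent of Python's set iteration order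
  let max_fib : Int := a3_candidates.foldl (fun max_fib a3 =>
    let fib : Int :=
      (if a3 = a1 + a2 then 1 else 0) + (if a4 = a2 + a3 then 1 else 0) +
        (if a5 = a3 + a4 then 1 else 0)
    if fib > max_fib then fib else max_fib) 0
  let a3_pair1 := a1 + a2
  let max_fib :=
    if a4 = a2 + a3_pair1 then
      let fib_pair1 : Int := if a5 = a3_pair1 + a4 then 2 + 1 else 2
      if fib_pair1 > max_fib then fib_pair1 else max_fib
    else max_fib
  let a3_pair2 := a4 - a2
  let max_fib :=
    if a5 = a3_pair2 + a4 then
      let fib_pair2 : Int := if a3_pair2 = a1 + a2 then 2 + 1 else 2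
      if fib_pair2 > max_fib then fib_pair2 else max_fib
    else max_fib
  let a3_pair3 := a5 - a4
  let max_fib :=
    if a3_pair3 = a1 + a2 then
      let fib_pair3 : Int := if a4 = a2 + a3_pair3 then 2 + 1 else 2
      if fib_pair3 > max_fib then fib_pair3 else max_fib
    else max_fib
  max_fib

def max_fibonacciness (test_cases : List (List Int)) : List Int :=
  test_cases.foldl (fun results case =>
    match case with
    | [a1, a2, a4, a5] => results ++ [pvFibCaseA a1 a2 a4 a5]
    | _ => results) []   -- Python raises ValueError here; excluded by Pre_

-- ===== PORT B =====
-- '4 - len({a1+a2, a4-a2, a5-a4})' for one case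
def pvFibCaseB (a1 a2 a4 a5 : Int) : Int :=
  4 - (PySem.Set.len (PySem.Set.ofList [a1 + a2, a4 - a2, a5 - a4]) : Int)

def max_fibonacciness_alt (test_cases : List (List Int)) : List Int :=
  test_cases.map (fun case =>
    -- 'for a1, a2, a4, a5 in test_cases' (Python raises ValueError unless len = 4; excluded by Pre_)
    if case.length = 4 then
      pvFibCaseB (case.getD 0 0) (case.getD 1 0) (case.getD 2 0) (case.getD 3 0)
    else 0)

-- ===== PRECONDITION & SPEC =====
-- Pre_ excludes exactly the inputs where A raises ValueError: a case that is not a 4-list.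
def Pre_max_fibonacciness (test_cases : List (List Int)) : Prop :=
  ∀ case ∈ test_cases, case.length = 4
instance (test_cases : List (List Int)) : Decidable (Pre_max_fibonacciness test_cases) := by
  unfold Pre_max_fibonacciness; infer_instance

def pvWitness_max_fibonacciness : List (List Int) := [[1, 1, 3, 5], [0, 0, 0, 1]]

def Spec_max_fibonacciness (test_cases : List (List Int)) (out : List Int) : Prop := out = max_fibonacciness_alt test_cases
instance (test_cases : List (List Int)) (out : List Int) : Decidable (Spec_max_fibonacciness test_cases out) := by unfold Spec_max_fibonacciness; infer_instance

-- ===== CLAIM (what is proved, stated in full; the proofs are below) =====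
def Claim_equal_max_fibonacciness : Prop := ∀ (test_cases : List (List Int)), Dom_max_fibonacciness test_cases → Pre_max_fibonacciness test_cases → Spec_max_fibonacciness test_cases (max_fibonacciness test_cases)

-- ===== LEMMAS AND PROOFS =====

-- B's per-case value in closed form
theorem pvFibCaseB_closed (a1 a2 a4 a5 : Int) : pvFibCaseB a1 a2 a4 a5 =
    if a1 + a2 = a4 - a2 ∧ a4 - a2 = a5 - a4 then 3
    else if a1 + a2 = a4 - a2 ∨ a1 + a2 = a5 - a4 ∨ a4 - a2 = a5 - a4 then 2 else 1 := by
  by_cases h12 : a1 + a2 = a4 - a2 <;> by_cases h13 : a1 + a2 = a5 - a4 <;>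
    by_cases h23 : a4 - a2 = a5 - a4 <;>
    simp_all [pvFibCaseB, PySem.Set.len, PySem.Set.ofList, PySem.Set.add, PySem.Set.contains] <;>
    (try (split_ifs <;> simp_all)) <;> omega

-- A's per-case value reaches the same closed form
set_option maxHeartbeats 2000000 in
theorem pvFibCaseA_closed (a1 a2 a4 a5 : Int) : pvFibCaseA a1 a2 a4 a5 =
    if a1 + a2 = a4 - a2 ∧ a4 - a2 = a5 - a4 then 3
    else if a1 + a2 = a4 - a2 ∨ a1 + a2 = a5 - a4 ∨ a4 - a2 = a5 - a4 then 2 else 1 := by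
  have e2 : ∀ a3 : Int, (a4 = a2 + a3) = (a3 = a4 - a2) := by intro a3; ext; omega
  have e3 : ∀ a3 : Int, (a5 = a3 + a4) = (a3 = a5 - a4) := by intro a3; ext; omega
  simp only [pvFibCaseA, e2, e3]
  by_cases h12 : a1 + a2 = a4 - a2 <;> by_cases h13 : a1 + a2 = a5 - a4 <;>
    by_cases h23 : a4 - a2 = a5 - a4 <;>
    simp_all [PySem.Set.ofList, PySem.Set.add, PySem.Set.contains] <;>
    (try (split_ifs <;> simp_all)) <;> omega

theorem pvFibCase_eq (a1 a2 a4 a5 : Int) : pvFibCaseA a1 a2 a4 a5 = pvFibCaseB a1 a2 a4 a5 := by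
  rw [pvFibCaseA_closed, pvFibCaseB_closed]

theorem pv_folds_eq : ∀ tcs : List (List Int), Pre_max_fibonacciness tcs →
    max_fibonacciness tcs = max_fibonacciness_alt tcs := by
  intro tcs
  induction tcs using List.reverseRecOn with
  | nil => intro _; rfl
  | append_singleton init c ih =>
      intro h
      have hc : c.length = 4 := h c (by simp)
      have hinit := ih (fun x hx => h x (by simp [hx]))
      unfold max_fibonacciness max_fibonacciness_alt at hinit ⊢
      match c, hc with
      | [a1, a2, a4, a5], _ =>
        simp only [List.foldl_append, List.foldl_cons, List.foldl_nil, List.map_append,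
          List.map_cons, List.map_nil]
        rw [hinit]
        simp [List.getD, pvFibCase_eq]

-- ===== VERDICT (by name: the statement is the Claim_ definition above) =====
theorem max_fibonacciness_spec : Claim_equal_max_fibonacciness := by
  intro tcs _ hpre
  exact pv_folds_eq tcs hpre
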